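-- pv_equiv track=rewrite | github.com/d-j-e/SNPPar_test | code/processSeqGen.py | makeFasta
-- ===== SOURCE A (Python) =====
-- def makeFasta(snp_calls,names):
-- 	fasta = ''
-- 	for i in range(len(names)):
-- 		fasta += '>' + names[i] + '\n'
-- 		for j in range(len(snp_calls)):
-- 			fasta += snp_calls[j][0][i]
-- 		fasta += '\n'
-- 	return fasta
-- ===== SOURCE B (Python) =====
-- def makeFasta(snp_calls, names):
--     # transposed pass: one accumulator per name, filled column-wise per SNP call
--     acc = [[] for _ in names]
--     for call, _ in snp_calls:
--         acc = [acc[i] + [call[i]] for i in range(len(names))]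
--     parts = ['>' + names[i] + '\n' + ''.join(acc[i]) + '\n' for i in range(len(names))]
--     return ''.join(parts)
-- ===== Notes on version B (the rewrite author's own statement) =====
-- stated objective: alternative
-- what changed: Transposes the loop nesting: instead of building each name's sequence with a full scan over snp_calls per name, B keeps one per-name accumulator and fills all of them column-wise in a single outer pass over snp_calls, then joins headers and columns.
import Mathlib
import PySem

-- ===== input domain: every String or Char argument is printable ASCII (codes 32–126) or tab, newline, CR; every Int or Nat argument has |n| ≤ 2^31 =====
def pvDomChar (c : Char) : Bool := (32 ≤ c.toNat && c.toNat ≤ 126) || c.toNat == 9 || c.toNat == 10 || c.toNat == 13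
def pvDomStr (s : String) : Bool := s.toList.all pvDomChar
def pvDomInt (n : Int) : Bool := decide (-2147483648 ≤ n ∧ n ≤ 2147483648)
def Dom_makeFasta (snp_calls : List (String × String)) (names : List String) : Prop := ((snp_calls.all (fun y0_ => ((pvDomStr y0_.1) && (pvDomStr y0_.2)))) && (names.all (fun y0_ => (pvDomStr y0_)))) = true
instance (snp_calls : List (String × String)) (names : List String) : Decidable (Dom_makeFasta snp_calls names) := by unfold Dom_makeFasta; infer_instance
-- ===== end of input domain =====

-- B transposes the loop nesting (one pass over snp_calls filling per-name accumulators); equivalence of return values on Pre_.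

-- ===== PORT A =====
-- literal transliteration of A: outer loop over names, inner loop over snp_calls appending one char at a time.
-- indexing names[i] / snp_calls[j] is always in range here, so getD is exact; snp_calls[j][0][i] is in range on Pre_.
def makeFasta (snp_calls : List (String × String)) (names : List String) : String :=
  String.ofList <|
    (List.range names.length).foldl (fun fasta i =>
      let fasta := fasta ++ '>' :: (names.getD i "").toList ++ ['\n']
      let fasta := (List.range snp_calls.length).foldl
        (fun fasta j => fasta ++ [(snp_calls.getD j ("", "")).1.toList.getD i ' ']) fasta
      fasta ++ ['\n']) []

-- ===== PORT B =====
-- transliteration of B: per-name accumulators filled in one pass over snp_calls, then headers + columns joined.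
def makeFasta_alt (snp_calls : List (String × String)) (names : List String) : String :=
  let acc0 : List (List Char) := names.map (fun _ => ([] : List Char))
  let acc := snp_calls.foldl (fun acc p =>
      (List.range names.length).map (fun i => acc.getD i [] ++ [p.1.toList.getD i ' '])) acc0
  let parts := (List.range names.length).map (fun i =>
      '>' :: (names.getD i "").toList ++ '\n' :: (acc.getD i [] ++ ['\n']))
  String.ofList parts.flatten

-- ===== PRECONDITION & SPEC =====
-- A raises IndexError when some name index reaches past a call string's end; Pre_ excludes exactly those ragged inputs.
def Pre_makeFasta (snp_calls : List (String × String)) (names : List String) : Prop :=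
  ∀ p ∈ snp_calls, names.length ≤ p.1.toList.length
instance (snp_calls : List (String × String)) (names : List String) : Decidable (Pre_makeFasta snp_calls names) := by unfold Pre_makeFasta; infer_instance
def pvWitness_makeFasta : (List (String × String)) × List String :=
  ([("AC", "p1"), ("GT", "p2")], ["s1", "s2"])
def Spec_makeFasta (snp_calls : List (String × String)) (names : List String) (out : String) : Prop := out = makeFasta_alt snp_calls names
instance (snp_calls : List (String × String)) (names : List String) (out : String) : Decidable (Spec_makeFasta snp_calls names out) := by unfold Spec_makeFasta; infer_instance

-- ===== CLAIM (what is proved, stated in full; the proofs are below) =====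
def Claim_equal_makeFasta : Prop := ∀ (snp_calls : List (String × String)) (names : List String), Dom_makeFasta snp_calls names → Pre_makeFasta snp_calls names → Spec_makeFasta snp_calls names (makeFasta snp_calls names)

-- ===== LEMMAS AND PROOFS =====

-- indexing a list through range(len(l)) is just mapping over the list
theorem map_range_getD {α β : Type} (l : List α) (d : α) (f : α → β) :
    (List.range l.length).map (fun j => f (l.getD j d)) = l.map f := by
  induction l with
  | nil => simp
  | cons x xs ih =>
    simp [List.range_succ_eq_map, List.map_map]
    exact ih

theorem getD_range_map {α : Type} (n : Nat) (g : Nat → α) (d : α) (i : Nat) (hi : i < n) :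
    ((List.range n).map g).getD i d = g i := by
  rw [List.getD_eq_getElem?_getD]
  simp [hi]

-- B's accumulating pass computes, per name index, the column of chars over the processed calls
theorem acc_invariant (calls : List (String × String)) (n : Nat) (g : Nat → List Char) :
    calls.foldl (fun acc p =>
        (List.range n).map (fun i => acc.getD i [] ++ [p.1.toList.getD i ' ']))
      ((List.range n).map g)
    = (List.range n).map (fun i => g i ++ calls.map (fun p => p.1.toList.getD i ' ')) := by
  induction calls generalizing g with
  | nil => simp
  | cons p calls ih =>
    simp only [List.foldl_cons]
    have hstep : (List.range n).map (fun i => ((List.range n).map g).getD i [] ++ [p.1.toList.getD i ' '])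
        = (List.range n).map (fun i => g i ++ [p.1.toList.getD i ' ']) := by
      apply List.map_congr_left
      intro i hi
      rw [getD_range_map n g [] i (List.mem_range.mp hi)]
    rw [hstep, ih]
    apply List.map_congr_left
    intro i _
    simp [List.append_assoc]

-- ===== VERDICT (by name: the statement is the Claim_ definition above) =====

theorem makeFasta_spec : Claim_equal_makeFasta := by
  intro snp_calls names _ _
  unfold Spec_makeFasta makeFasta makeFasta_alt
  simp only []
  congr 1
  -- A's outer loop: each iteration appends one block, so the whole loop is a flatMap of blocks
  have hA : ∀ (fasta0 : List Char),
      (List.range names.length).foldl (fun fasta i =>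
        ((fasta ++ '>' :: (names.getD i "").toList ++ ['\n']) ++
          (List.range snp_calls.length).map (fun j => (snp_calls.getD j ("", "")).1.toList.getD i ' '))
        ++ ['\n']) fasta0
      = fasta0 ++ (List.range names.length).flatMap (fun i =>
          '>' :: (names.getD i "").toList ++ '\n' ::
            ((List.range snp_calls.length).map (fun j => (snp_calls.getD j ("", "")).1.toList.getD i ' ') ++ ['\n'])) := by
    intro fasta0
    rw [show (fun fasta i =>
        ((fasta ++ '>' :: (names.getD i "").toList ++ ['\n']) ++
          (List.range snp_calls.length).map (fun j => (snp_calls.getD j ("", "")).1.toList.getD i ' '))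
        ++ ['\n'])
      = (fun (fasta : List Char) (i : Nat) => fasta ++
          ('>' :: (names.getD i "").toList ++ '\n' ::
            ((List.range snp_calls.length).map (fun j => (snp_calls.getD j ("", "")).1.toList.getD i ' ') ++ ['\n'])))
      from by funext fasta i; simp]
    exact PySem.List.foldl_append_eq_flatMap _ _ _
  -- rewrite A's inner loop into that map form
  have hInner : ∀ (i : Nat) (f0 : List Char),
      (List.range snp_calls.length).foldl
        (fun fasta j => fasta ++ [(snp_calls.getD j ("", "")).1.toList.getD i ' ']) f0
      = f0 ++ (List.range snp_calls.length).map (fun j => (snp_calls.getD j ("", "")).1.toList.getD i ' ') := by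
    intro i f0
    exact PySem.List.foldl_append_singleton_eq_map _ _ _
  have hAeq : (List.range names.length).foldl (fun fasta i =>
      (List.range snp_calls.length).foldl
        (fun fasta j => fasta ++ [(snp_calls.getD j ("", "")).1.toList.getD i ' '])
        (fasta ++ '>' :: (names.getD i "").toList ++ ['\n']) ++ ['\n']) []
    = (List.range names.length).flatMap (fun i =>
        '>' :: (names.getD i "").toList ++ '\n' ::
          ((List.range snp_calls.length).map (fun j => (snp_calls.getD j ("", "")).1.toList.getD i ' ') ++ ['\n'])) := by
    have := hA []
    simp only [List.nil_append] at this
    rw [← this]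
    apply PySem.List.foldl_congr_mem
    intro acc i _
    rw [hInner i]
  rw [hAeq]
  -- B's side: accumulator equals the columns, and the flatten of the parts is the same flatMap
  have hacc0 : names.map (fun _ => ([] : List Char)) = (List.range names.length).map (fun _ => ([] : List Char)) := by
    simp [List.map_const']
  rw [hacc0, acc_invariant snp_calls names.length (fun _ => ([] : List Char))]
  rw [List.flatMap_def]
  congr 1
  apply List.map_congr_left
  intro i hi
  have hcol : ((List.range names.length).map
        (fun i => ([] : List Char) ++ snp_calls.map (fun p => p.1.toList.getD i ' '))).getD i []
      = snp_calls.map (fun p => p.1.toList.getD i ' ') := by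
    rw [getD_range_map _ _ _ _ (List.mem_range.mp hi)]
    simp
  rw [hcol, map_range_getD snp_calls ("", "") (fun p => p.1.toList.getD i ' ')]
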